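-- pv_equiv track=rewrite | github.com/jiji7879/AdventOfCode2024 | day20/day20.py | findAllCheats
-- ===== SOURCE A (Python) =====
-- def findCheatFromCoordinate(path: list, startingCoordinate: (int, int), startingCoordinateIndex: int, threshold: int,
--                             maxCheatLength: int) -> list:
--     cheatPaths = []
--     for endIndex in range(startingCoordinateIndex + threshold, len(path)):
--         cheatLength = abs(path[endIndex][0] - startingCoordinate[0]) + abs(path[endIndex][1] - startingCoordinate[1])
--         if cheatLength <= maxCheatLength and endIndex - startingCoordinateIndex - cheatLength >= threshold:
--             cheatPaths.append((endIndex - startingCoordinateIndex - cheatLength, startingCoordinate, path[endIndex]))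
--     return cheatPaths
--
-- def findAllCheats(path: list, threshold: int, maxCheatLength: int) -> list:
--     allCheats = []
--     for index in range(len(path) - threshold):
--         cheats = findCheatFromCoordinate(path, path[index], index, threshold, maxCheatLength)
--         if len(cheats) > 0:
--             for cheat in cheats:
--                 allCheats.append(cheat)
--     return allCheats
-- ===== SOURCE B (Python) =====
-- def findAllCheats(path, threshold, maxCheatLength):
--     byX = {}
--     for endIndex, (x, y) in enumerate(path):
--         byX.setdefault(x, []).append((y, endIndex))
--     allCheats = []
--     for startIndex, (sx, sy) in enumerate(path):
--         hits = []
--         for cx, column in byX.items():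
--             dx = abs(cx - sx)
--             if dx <= maxCheatLength:
--                 for cy, endIndex in column:
--                     cheatLength = dx + abs(cy - sy)
--                     saving = endIndex - startIndex - cheatLength
--                     if cheatLength <= maxCheatLength and saving >= threshold:
--                         hits.append((endIndex, (saving, (sx, sy), (cx, cy))))
--         hits.sort(key=lambda h: h[0])
--         allCheats.extend(t for _, t in hits)
--     return allCheats
-- ===== Notes on version B (the rewrite author's own statement) =====
-- stated objective: alternative
-- what changed: B replaces A's per-start rescan of the whole path by a dict grouping path points by x-coordinate built once; per start it visits only columns whose x-distance fits the cheat budget, collects hits tagged with their end index, and sorts them by end index to restore A's order.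
import Mathlib
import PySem

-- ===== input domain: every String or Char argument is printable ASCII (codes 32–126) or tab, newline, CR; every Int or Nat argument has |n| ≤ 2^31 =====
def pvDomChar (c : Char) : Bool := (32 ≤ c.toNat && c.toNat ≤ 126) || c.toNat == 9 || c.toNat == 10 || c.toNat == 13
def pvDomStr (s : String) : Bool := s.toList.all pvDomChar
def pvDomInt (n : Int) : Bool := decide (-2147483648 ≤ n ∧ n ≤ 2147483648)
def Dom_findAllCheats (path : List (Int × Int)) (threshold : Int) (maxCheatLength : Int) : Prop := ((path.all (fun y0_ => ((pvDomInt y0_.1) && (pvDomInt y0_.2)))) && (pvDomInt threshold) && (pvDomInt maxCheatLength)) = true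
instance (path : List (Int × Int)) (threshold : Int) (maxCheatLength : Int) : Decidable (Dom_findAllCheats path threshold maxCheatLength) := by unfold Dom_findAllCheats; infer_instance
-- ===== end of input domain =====

-- B groups the path by x-coordinate in a dict built once and, per start, scans only columns within the
-- cheat budget, sorting the collected hits by end index to restore A's output order (alternative
-- traversal, same exact output; not measured faster).


-- ===== PORT A =====
def findCheatFromCoordinate (path : List (Int × Int)) (startingCoordinate : Int × Int)
    (startingCoordinateIndex : Int) (threshold : Int) (maxCheatLength : Int) :
    List (Int × (Int × Int) × (Int × Int)) :=
  (PySem.List.pyRange (startingCoordinateIndex + threshold) (PySem.List.len path) 1).foldl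
    (fun cheatPaths endIndex =>
      let pe := PySem.List.pyGetD path endIndex (0, 0)
      let cheatLength := |pe.1 - startingCoordinate.1| + |pe.2 - startingCoordinate.2|
      if cheatLength ≤ maxCheatLength ∧ threshold ≤ endIndex - startingCoordinateIndex - cheatLength then
        cheatPaths ++ [(endIndex - startingCoordinateIndex - cheatLength, startingCoordinate, pe)]
      else cheatPaths) []

def findAllCheats (path : List (Int × Int)) (threshold : Int) (maxCheatLength : Int) :
    List (Int × (Int × Int) × (Int × Int)) :=
  (PySem.List.pyRange 0 (PySem.List.len path - threshold) 1).foldl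
    (fun allCheats index =>
      let cheats := findCheatFromCoordinate path (PySem.List.pyGetD path index (0, 0)) index threshold maxCheatLength
      if 0 < cheats.length then allCheats ++ cheats else allCheats) []

-- ===== PORT B =====
def pvGroupByX (path : List (Int × Int)) : PySem.Dict Int (List (Int × Int)) :=
  (PySem.List.enumerate path 0).foldl (fun d p => d.modify p.2.1 [] (· ++ [(p.2.2, p.1)])) PySem.Dict.empty

def findAllCheats_alt (path : List (Int × Int)) (threshold : Int) (maxCheatLength : Int) :
    List (Int × (Int × Int) × (Int × Int)) :=
  let byX := pvGroupByX path
  (PySem.List.enumerate path 0).foldl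
    (fun allCheats si =>
      let startIndex := si.1
      let s := si.2
      let hits := byX.items.foldl
        (fun hits kc =>
          let dx := |kc.1 - s.1|
          if dx ≤ maxCheatLength then
            kc.2.foldl
              (fun hits ye =>
                let cheatLength := dx + |ye.1 - s.2|
                let saving := ye.2 - startIndex - cheatLength
                if cheatLength ≤ maxCheatLength ∧ threshold ≤ saving then
                  hits ++ [(ye.2, (saving, s, (kc.1, ye.1)))]
                else hits) hits
          else hits) []
      allCheats ++ (PySem.List.sorted hits (fun h => h.1) false).map (·.2)) []

-- ===== PRECONDITION & SPEC =====
-- A raises IndexError whenever threshold < 0 (its outer range then runs past the end of path); Pre_ excludes exactly those inputs.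
def Pre_findAllCheats (path : List (Int × Int)) (threshold : Int) (maxCheatLength : Int) : Prop := 0 ≤ threshold
instance (path : List (Int × Int)) (threshold : Int) (maxCheatLength : Int) : Decidable (Pre_findAllCheats path threshold maxCheatLength) := by unfold Pre_findAllCheats; infer_instance
def pvWitness_findAllCheats : (List (Int × Int)) × Int × Int := ([(0,0),(0,1),(5,1),(5,0)], 1, 3)

def Spec_findAllCheats (path : List (Int × Int)) (threshold : Int) (maxCheatLength : Int) (out : List (Int × (Int × Int) × (Int × Int))) : Prop := out = findAllCheats_alt path threshold maxCheatLength
instance (path : List (Int × Int)) (threshold : Int) (maxCheatLength : Int) (out : List (Int × (Int × Int) × (Int × Int))) : Decidable (Spec_findAllCheats path threshold maxCheatLength out) := by unfold Spec_findAllCheats; infer_instance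

-- ===== CLAIM =====
def Claim_equal_findAllCheats : Prop := ∀ (path : List (Int × Int)) (threshold : Int) (maxCheatLength : Int), Dom_findAllCheats path threshold maxCheatLength → Pre_findAllCheats path threshold maxCheatLength → Spec_findAllCheats path threshold maxCheatLength (findAllCheats path threshold maxCheatLength)

-- ===== LEMMAS AND PROOFS =====


-- proof-only helpers: the shared shape of both programs' per-start scan
def pvGetP (path : List (Int × Int)) (e : Int) : Int × Int := PySem.List.pyGetD path e (0, 0)

def pvCL (path : List (Int × Int)) (s : Int × Int) (e : Int) : Int :=
  |(pvGetP path e).1 - s.1| + |(pvGetP path e).2 - s.2|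

def pvC (path : List (Int × Int)) (t L : Int) (s : Int × Int) (i e : Int) : Bool :=
  decide (pvCL path s e ≤ L ∧ t ≤ e - i - pvCL path s e)

def pvV (path : List (Int × Int)) (s : Int × Int) (i e : Int) : Int × (Int × Int) × (Int × Int) :=
  (e - i - pvCL path s e, s, pvGetP path e)

def pvF (path : List (Int × Int)) (t L : Int) (i : Int) : List (Int × (Int × Int) × (Int × Int)) :=
  ((PySem.List.pyRange 0 (PySem.List.len path)).filter (pvC path t L (pvGetP path i) i)).map
    (pvV path (pvGetP path i) i)

def pvQ (t L : Int) (s : Int × Int) (i : Int) (p : Int × Int × Int) : Bool :=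
  decide ((|p.2.1 - s.1| + |p.2.2 - s.2|) ≤ L ∧ t ≤ p.1 - i - (|p.2.1 - s.1| + |p.2.2 - s.2|))

def pvW (s : Int × Int) (i : Int) (p : Int × Int × Int) :
    Int × (Int × (Int × Int) × (Int × Int)) :=
  (p.1, (p.1 - i - (|p.2.1 - s.1| + |p.2.2 - s.2|), s, p.2))

def pvHits (path : List (Int × Int)) (threshold maxCheatLength : Int) (s : Int × Int) (startIndex : Int) :
    List (Int × (Int × (Int × Int) × (Int × Int))) :=
  (pvGroupByX path).items.foldl
    (fun hits kc =>
      let dx := |kc.1 - s.1|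
      if dx ≤ maxCheatLength then
        kc.2.foldl
          (fun hits ye =>
            let cheatLength := dx + |ye.1 - s.2|
            let saving := ye.2 - startIndex - cheatLength
            if cheatLength ≤ maxCheatLength ∧ threshold ≤ saving then
              hits ++ [(ye.2, (saving, s, (kc.1, ye.1)))]
            else hits) hits
      else hits) []

theorem pv_flatMap_congr {a b : Type} (l : List a) (f g : a → List b)
    (h : ∀ x ∈ l, f x = g x) : l.flatMap f = l.flatMap g := by
  induction l with
  | nil => rfl
  | cons x l ih =>
      simp only [List.flatMap_cons, h x (by simp)]
      rw [ih (fun y hy => h y (by simp [hy]))]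

theorem pv_partition_perm {a k0 : Type} [DecidableEq k0] (ks : List k0) (key : a → k0)
    (l : List a) (hnd : ks.Nodup) (hcov : ∀ x ∈ l, key x ∈ ks) :
    (ks.flatMap (fun k => l.filter (fun x => decide (key x = k)))).Perm l := by
  induction ks generalizing l with
  | nil =>
      have hl : l = [] := by
        cases l with
        | nil => rfl
        | cons x t => exact absurd (hcov x (by simp)) (by simp)
      simp [hl]
  | cons k ks ih =>
      rw [List.flatMap_cons]
      have hne : k ∉ ks := (List.nodup_cons.mp hnd).1
      have hstep : ∀ k' ∈ ks, l.filter (fun x => decide (key x = k')) =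
          (l.filter (fun x => !decide (key x = k))).filter (fun x => decide (key x = k')) := by
        intro k' hk'
        rw [List.filter_filter]
        apply List.filter_congr
        intro x _
        by_cases hx : key x = k'
        · have hkk : key x ≠ k := by rintro rfl; exact hne (hx ▸ hk')
          have hk2 : ¬ k' = k := by rintro rfl; exact hkk hx
          simp [hx, hk2]
        · simp [hx]
      rw [pv_flatMap_congr ks _ _ hstep]
      have hperm := ih (l.filter (fun x => !decide (key x = k))) (List.nodup_cons.mp hnd).2
        (by
          intro x hx
          have hxl : x ∈ l := List.mem_of_mem_filter hx
          have hxk : ¬ key x = k := by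
            have := List.of_mem_filter hx; simpa using this
          have := hcov x hxl
          simp only [List.mem_cons] at this
          exact this.resolve_left hxk)
      exact (List.Perm.append_left _ hperm).trans (List.filter_append_perm _ l)

-- A-side characterisation
theorem pvA_inner (path : List (Int × Int)) (s : Int × Int) (i t L : Int) :
    findCheatFromCoordinate path s i t L =
      ((PySem.List.pyRange (i + t) (PySem.List.len path)).filter (pvC path t L s i)).map (pvV path s i) := by
  unfold findCheatFromCoordinate
  have hcongr : ∀ (acc : List (Int × (Int × Int) × (Int × Int))),
      ∀ e ∈ PySem.List.pyRange (i + t) (PySem.List.len path),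
      (let pe := PySem.List.pyGetD path e (0, 0)
       let cheatLength := |pe.1 - s.1| + |pe.2 - s.2|
       if cheatLength ≤ L ∧ t ≤ e - i - cheatLength then
         acc ++ [(e - i - cheatLength, s, pe)]
       else acc)
      = (if pvC path t L s i e = true then acc ++ [pvV path s i e] else acc) := by
    intro acc e _
    by_cases h : pvCL path s e ≤ L ∧ t ≤ e - i - pvCL path s e
    · simp only [pvC, pvCL, pvGetP, pvV] at *
      simp [h]
    · simp only [pvC, pvCL, pvGetP, pvV] at *
      simp [h]
  rw [PySem.List.foldl_congr_mem _ _ _ _ hcongr, PySem.List.foldl_append_if, List.nil_append]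

theorem pvC_implies_lb (path : List (Int × Int)) (t L : Int) (s : Int × Int) (i e : Int)
    (h : pvC path t L s i e = true) : i + t ≤ e := by
  have hcl : 0 ≤ pvCL path s e := by
    unfold pvCL; positivity
  simp only [pvC, decide_eq_true_eq] at h
  omega

theorem pvA_inner_full (path : List (Int × Int)) (s : Int × Int) (i t L : Int) (ht : 0 ≤ t) (hi : 0 ≤ i) :
    findCheatFromCoordinate path s i t L =
      ((PySem.List.pyRange 0 (PySem.List.len path)).filter (pvC path t L s i)).map (pvV path s i) := by
  rw [pvA_inner]
  by_cases hle : i + t ≤ PySem.List.len path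
  · rw [PySem.List.pyRange_one_append 0 (i + t) (PySem.List.len path) (by omega) hle,
      List.filter_append]
    have h0 : (PySem.List.pyRange 0 (i + t)).filter (pvC path t L s i) = [] := by
      rw [List.filter_eq_nil_iff]
      intro e he hc
      have := pvC_implies_lb path t L s i e hc
      have := PySem.List.mem_pyRange_one.mp he
      omega
    rw [h0, List.nil_append]
  · have h1 : PySem.List.pyRange (i + t) (PySem.List.len path) = [] :=
      PySem.List.pyRange_one_eq_nil (by omega)
    have h2 : (PySem.List.pyRange 0 (PySem.List.len path)).filter (pvC path t L s i) = [] := by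
      rw [List.filter_eq_nil_iff]
      intro e he hc
      have := pvC_implies_lb path t L s i e hc
      have := PySem.List.mem_pyRange_one.mp he
      omega
    rw [h1, h2]
    simp

theorem pvA_eq (path : List (Int × Int)) (t L : Int) (ht : 0 ≤ t) :
    findAllCheats path t L = (PySem.List.pyRange 0 (PySem.List.len path)).flatMap (pvF path t L) := by
  unfold findAllCheats
  have hlen : (0 : Int) ≤ PySem.List.len path := by
    rw [PySem.List.len_eq]; positivity
  have hcongr : ∀ (acc : List (Int × (Int × Int) × (Int × Int))),
      ∀ i ∈ PySem.List.pyRange 0 (PySem.List.len path - t),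
      (let cheats := findCheatFromCoordinate path (PySem.List.pyGetD path i (0, 0)) i t L
       if 0 < cheats.length then acc ++ cheats else acc)
      = acc ++ pvF path t L i := by
    intro acc i hi
    have hi0 : 0 ≤ i := (PySem.List.mem_pyRange_one.mp hi).1
    have hf : findCheatFromCoordinate path (PySem.List.pyGetD path i (0, 0)) i t L = pvF path t L i := by
      rw [pvA_inner_full path _ i t L ht hi0]; rfl
    simp only [hf]
    by_cases h : 0 < (pvF path t L i).length
    · simp [h]
    · have : pvF path t L i = [] := by
        cases hpf : pvF path t L i with
        | nil => rfl
        | cons x xs => rw [hpf] at h; simp at h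
      simp [this]
  rw [PySem.List.foldl_congr_mem _ _ (fun acc i => acc ++ pvF path t L i) _ hcongr,
    PySem.List.foldl_append_eq_flatMap, List.nil_append]
  have hFnil : ∀ i, 0 ≤ i → PySem.List.len path - t ≤ i → pvF path t L i = [] := by
    intro i hi0 hit
    unfold pvF
    rw [List.filter_eq_nil_iff.mpr, List.map_nil]
    intro e he hc
    have := pvC_implies_lb path t L _ i e hc
    have := PySem.List.mem_pyRange_one.mp he
    omega
  by_cases hnt : t ≤ PySem.List.len path
  · rw [PySem.List.pyRange_one_append 0 (PySem.List.len path - t) (PySem.List.len path)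
      (by omega) (by omega), List.flatMap_append]
    have : (PySem.List.pyRange (PySem.List.len path - t) (PySem.List.len path)).flatMap (pvF path t L) = [] := by
      rw [pv_flatMap_congr _ _ (fun _ => ([] : List (Int × (Int × Int) × (Int × Int))))]
      · simp
      · intro i hi
        have := PySem.List.mem_pyRange_one.mp hi
        exact hFnil i (by omega) (by omega)
    rw [this, List.append_nil]
  · have h1 : PySem.List.pyRange 0 (PySem.List.len path - t) = [] :=
      PySem.List.pyRange_one_eq_nil (by omega)
    have h2 : (PySem.List.pyRange 0 (PySem.List.len path)).flatMap (pvF path t L) = [] := by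
      rw [pv_flatMap_congr _ _ (fun _ => ([] : List (Int × (Int × Int) × (Int × Int))))]
      · simp
      · intro i hi
        have := PySem.List.mem_pyRange_one.mp hi
        exact hFnil i (by omega) (by omega)
    rw [h1, h2]
    rfl

-- B-side characterisation
theorem pvGroup_getD (path : List (Int × Int)) (cx : Int) :
    (pvGroupByX path).getD cx [] =
      ((PySem.List.enumerate path).filter (fun p => p.2.1 == cx)).map (fun p => (p.2.2, p.1)) := by
  have h : pvGroupByX path =
      ((PySem.List.enumerate path).map (fun p => (p.2.1, (p.2.2, p.1)))).foldl
        (fun d q => d.modify q.1 [] (· ++ [q.2])) PySem.Dict.empty := by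
    unfold pvGroupByX
    rw [List.foldl_map]
  rw [h, PySem.Dict.getD_foldl_modify_append, PySem.Dict.getD_empty, List.nil_append,
    List.filter_map, List.map_map]
  rfl

theorem pvGroup_keys (path : List (Int × Int)) :
    (pvGroupByX path).keys = PySem.Set.ofList ((PySem.List.enumerate path).map (fun p => p.2.1)) := by
  unfold pvGroupByX
  rw [PySem.Dict.keys_foldl_modify_key (PySem.List.enumerate path) (fun p => p.2.1) []
    (fun _ x => (· ++ [(x.2.2, x.1)])) PySem.Dict.empty, PySem.Dict.keys_empty]
  rfl

theorem pvGroup_keys_nodup (path : List (Int × Int)) : (pvGroupByX path).keys.Nodup := by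
  exact PySem.Dict.nodup_keys_foldl_modify_key (PySem.List.enumerate path) (fun p => p.2.1) []
    (fun _ x => (· ++ [(x.2.2, x.1)])) PySem.Dict.empty PySem.Dict.nodup_keys_empty

theorem pvHits_perm (path : List (Int × Int)) (t L : Int) (s : Int × Int) (i : Int) :
    (((PySem.List.enumerate path).filter (pvQ t L s i)).map (pvW s i)).Perm (pvHits path t L s i) := by
  unfold pvHits
  have houter : ∀ (acc : List (Int × (Int × (Int × Int) × (Int × Int)))),
      ∀ kc ∈ (pvGroupByX path).items,
      (let dx := |kc.1 - s.1|
       if dx ≤ L then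
         kc.2.foldl
           (fun hits ye =>
             let cheatLength := dx + |ye.1 - s.2|
             let saving := ye.2 - i - cheatLength
             if cheatLength ≤ L ∧ t ≤ saving then
               hits ++ [(ye.2, (saving, s, (kc.1, ye.1)))]
             else hits) acc
       else acc)
      = acc ++ (kc.2.filter (fun ye => pvQ t L s i (ye.2, kc.1, ye.1))).map
          (fun ye => pvW s i (ye.2, kc.1, ye.1)) := by
    intro acc kc _
    by_cases hg : |kc.1 - s.1| ≤ L
    · simp only [hg, if_true]
      have hinner : ∀ (acc2 : List (Int × (Int × (Int × Int) × (Int × Int)))), ∀ ye ∈ kc.2,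
          (let cheatLength := |kc.1 - s.1| + |ye.1 - s.2|
           let saving := ye.2 - i - cheatLength
           if cheatLength ≤ L ∧ t ≤ saving then
             acc2 ++ [(ye.2, (saving, s, (kc.1, ye.1)))]
           else acc2)
          = (if pvQ t L s i (ye.2, kc.1, ye.1) = true then
              acc2 ++ [pvW s i (ye.2, kc.1, ye.1)] else acc2) := by
        intro acc2 ye _
        by_cases h : (|kc.1 - s.1| + |ye.1 - s.2|) ≤ L ∧ t ≤ ye.2 - i - (|kc.1 - s.1| + |ye.1 - s.2|)
        · simp only [pvQ, pvW] at *
          simp [h]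
        · simp only [pvQ, pvW] at *
          simp [h]
      rw [PySem.List.foldl_congr_mem _ _ _ _ hinner, PySem.List.foldl_append_if]
    · simp only [hg, if_false]
      have hnil : kc.2.filter (fun ye => pvQ t L s i (ye.2, kc.1, ye.1)) = [] := by
        rw [List.filter_eq_nil_iff]
        intro ye _ hq
        simp only [pvQ, decide_eq_true_eq] at hq
        have h1 : (0 : Int) ≤ |ye.1 - s.2| := abs_nonneg _
        omega
      rw [hnil, List.map_nil, List.append_nil]
  rw [PySem.List.foldl_congr_mem _ _
    (fun acc kc => acc ++ (kc.2.filter (fun ye => pvQ t L s i (ye.2, kc.1, ye.1))).map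
      (fun ye => pvW s i (ye.2, kc.1, ye.1))) _ houter,
    PySem.List.foldl_append_eq_flatMap, List.nil_append,
    PySem.Dict.items_eq_map_keys (pvGroupByX path) (pvGroup_keys_nodup path) ([] : List (Int × Int)),
    List.flatMap_map]
  have hbucket : ∀ cx ∈ (pvGroupByX path).keys,
      (((pvGroupByX path).getD cx []).filter (fun ye => pvQ t L s i (ye.2, cx, ye.1))).map
          (fun ye => pvW s i (ye.2, cx, ye.1))
      = (((PySem.List.enumerate path).filter (pvQ t L s i)).filter
          (fun p => decide (p.2.1 = cx))).map (pvW s i) := by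
    intro cx _
    rw [pvGroup_getD, List.filter_map, List.map_map, List.filter_filter, List.filter_filter]
    have hpred : ∀ p ∈ PySem.List.enumerate path,
        (((fun ye => pvQ t L s i (ye.2, cx, ye.1)) ∘ (fun p => (p.2.2, p.1))) p &&
          (p.2.1 == cx))
        = (decide (p.2.1 = cx) && pvQ t L s i p) := by
      intro p _
      by_cases hc : p.2.1 = cx
      · subst hc
        simp [Function.comp]
      · simp [Function.comp, hc]
    rw [List.filter_congr hpred]
    apply List.map_congr_left
    intro p hp
    have hc : p.2.1 = cx := by
      have := List.of_mem_filter hp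
      simp only [Bool.and_eq_true, decide_eq_true_eq] at this
      exact this.1
    simp [Function.comp, pvW, ← hc]
  rw [pv_flatMap_congr _ _ _ hbucket]
  have hmap : ((pvGroupByX path).keys.flatMap
      (fun cx => (((PySem.List.enumerate path).filter (pvQ t L s i)).filter
        (fun p => decide (p.2.1 = cx))).map (pvW s i)))
      = ((pvGroupByX path).keys.flatMap
          (fun cx => ((PySem.List.enumerate path).filter (pvQ t L s i)).filter
            (fun p => decide (p.2.1 = cx)))).map (pvW s i) := by
    rw [List.map_flatMap]
  rw [hmap]
  apply List.Perm.symm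
  apply List.Perm.map
  rw [pvGroup_keys]
  refine pv_partition_perm _ (fun p : Int × Int × Int => p.2.1) _ (PySem.Set.nodup_ofList _) ?_
  intro p hp
  rw [PySem.Set.mem_ofList]
  exact List.mem_map_of_mem (List.mem_of_mem_filter hp)

theorem pvHits_sorted (path : List (Int × Int)) (t L : Int) (s : Int × Int) (i : Int) :
    PySem.List.sorted (pvHits path t L s i) (fun h => h.1) =
      ((PySem.List.enumerate path).filter (pvQ t L s i)).map (pvW s i) := by
  apply PySem.List.sorted_eq_of_perm_of_pairwise_lt _ _ _ (pvHits_perm path t L s i)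
  rw [List.pairwise_map]
  have henum : List.Pairwise (fun (p q : Int × Int × Int) => p.1 < q.1)
      (PySem.List.enumerate path) := by
    rw [PySem.List.enumerate_eq_map_pyRange path (0, 0), List.pairwise_map]
    exact PySem.List.pairwise_lt_pyRange_one 0 _
  exact henum.filter _

theorem pvB_per_start (path : List (Int × Int)) (t L : Int) (i : Int) :
    (PySem.List.sorted (pvHits path t L (pvGetP path i) i) (fun h => h.1)).map (fun h => h.2) =
      pvF path t L i := by
  rw [pvHits_sorted, List.map_map]
  unfold pvF
  rw [PySem.List.enumerate_eq_map_pyRange path (0, 0), List.filter_map, List.map_map]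
  rfl

theorem pvB_eq (path : List (Int × Int)) (t L : Int) :
    findAllCheats_alt path t L = (PySem.List.pyRange 0 (PySem.List.len path)).flatMap (pvF path t L) := by
  show (PySem.List.enumerate path).foldl
      (fun acc si => acc ++ (PySem.List.sorted (pvHits path t L si.2 si.1)
        (fun h => h.1)).map (fun h => h.2)) [] = _
  rw [PySem.List.foldl_append_eq_flatMap, List.nil_append,
    PySem.List.enumerate_eq_map_pyRange path (0, 0), List.flatMap_map]
  apply pv_flatMap_congr
  intro j _
  exact pvB_per_start path t L j

-- ===== VERDICT =====
theorem findAllCheats_spec : Claim_equal_findAllCheats := by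
  intro path t L _ hpre
  unfold Spec_findAllCheats
  rw [pvA_eq path t L hpre, pvB_eq]
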